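-- pv_equiv track=rewrite | github.com/calvinchankf/GoogleKickStart | 2020/A/c.py | f
-- ===== SOURCE A (Python) =====
-- import heapq
--
-- def f(arr, k):
--     pq = []
--     for i in range(1, len(arr)):
--         diff = arr[i] - arr[i-1]
--         heapq.heappush(pq, (
--             -diff,
--             min(arr[i], arr[i-1]),
--             max(arr[i], arr[i-1])
--         ))
--     while k > 0:
--         negativDiff, left, right = heapq.heappop(pq)
--
--         diff = (-negativDiff) // 2
--         mid = left + diff
--
--         # consider: left = 10, right = 13
--         # we want to split it into: (1, 10, 11), (2, 11, 13)
--         higherDiff = right - mid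
--
--         heapq.heappush(pq, (-diff, left, mid))
--         heapq.heappush(pq, (-higherDiff, mid, right))
--         k -= 1
--     return -pq[0][0]
-- ===== SOURCE B (Python) =====
-- def f(arr, k):
--     diffs = [arr[i] - arr[i - 1] for i in range(1, len(arr))]
--     cnt = {}
--     for d in diffs:
--         cnt[d] = cnt.get(d, 0) + 1
--     # every value >= 2 that a greedy halving split can ever produce lies in
--     # {d // 2**j, d // 2**j + 1} for some original gap d
--     seen = set()
--     for d in diffs:
--         q = d
--         while q >= 1:
--             if q >= 2:
--                 seen.add(q)
--             seen.add(q + 1)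
--             q = q // 2
--     for v in sorted(seen, reverse=True):
--         if k <= 0:
--             break
--         c = cnt.get(v, 0)
--         if c == 0:
--             continue
--         if c > k:
--             return v
--         k -= c
--         cnt[v] = 0
--         h = v // 2
--         cnt[h] = cnt.get(h, 0) + c
--         cnt[v - h] = cnt.get(v - h, 0) + c
--     return max(d for d in cnt if cnt[d] > 0)
-- ===== Notes on version B (the rewrite author's own statement) =====
-- stated objective: faster
-- what changed: B replaces the heap simulation of k single splits by value counting: one descending pass over the precomputed halving-closure of the gap values, splitting all equal gaps in a batch, so the running time does not grow with k.
-- intended difference: On strictly decreasing arrays with k > 0 (every gap negative) A floor-splits a negative gap, which makes the maximum gap larger and returns a spurious positive value (A([5,2],1)=5), while B performs no split and returns the true maximum gap (-3); a split should never increase the answer, so B's value is intended. — e.g. on f([5, 2], 1): A returns 5, B returns -3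
import Mathlib
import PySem

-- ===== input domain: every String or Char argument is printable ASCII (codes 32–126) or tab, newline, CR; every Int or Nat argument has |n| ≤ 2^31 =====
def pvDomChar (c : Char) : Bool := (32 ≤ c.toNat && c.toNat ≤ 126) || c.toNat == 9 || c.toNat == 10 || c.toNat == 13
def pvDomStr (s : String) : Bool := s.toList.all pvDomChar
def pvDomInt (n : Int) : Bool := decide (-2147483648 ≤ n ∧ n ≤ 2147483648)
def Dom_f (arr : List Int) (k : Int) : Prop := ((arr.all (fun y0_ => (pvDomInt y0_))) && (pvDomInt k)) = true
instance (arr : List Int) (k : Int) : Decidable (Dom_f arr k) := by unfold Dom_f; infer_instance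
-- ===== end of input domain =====

-- B replaces A's heap simulation of k single greedy splits by one descending pass
-- over the halving-closure of the gap values, splitting all equal gaps in a batch;
-- on strictly decreasing arrays with k > 0 the two differ (see D_f below).

-- ===== PORT A =====
-- heapq on tuples of ints is modelled exactly as a multiset with minimum
-- extraction: heappop returns the lexicographically least triple, pq[0] is the
-- least triple, and equal triples are indistinguishable, so which copy is
-- removed does not matter.

-- Python's `<` on int-triples (lexicographic)
def pvLex (a b : Int × Int × Int) : Bool :=
  decide (a.1 < b.1 ∨ (a.1 = b.1 ∧ (a.2.1 < b.2.1 ∨ (a.2.1 = b.2.1 ∧ a.2.2 < b.2.2))))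

-- a purely functional skew heap: the observable semantics of heapq exactly
-- (heappush adds an element, heappop removes the least triple, pq[0] reads it;
-- equal triples are indistinguishable, so which copy is taken does not matter)
inductive PvHeap
  | nil
  | node : (Int × Int × Int) → PvHeap → PvHeap → PvHeap
deriving DecidableEq, Repr

def PvHeap.size : PvHeap → Nat
  | .nil => 0
  | .node _ l r => l.size + r.size + 1

def pvMerge : PvHeap → PvHeap → PvHeap
  | .nil, h => h
  | .node a l r, .nil => .node a l r
  | .node a l r, .node b l2 r2 =>
    if pvLex a b then .node a (pvMerge r (.node b l2 r2)) l
    else .node b (pvMerge r2 (.node a l r)) l2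
termination_by h1 h2 => h1.size + h2.size
decreasing_by all_goals (simp [PvHeap.size] <;> omega)

-- heappush
def pvPush (h : PvHeap) (t : Int × Int × Int) : PvHeap := pvMerge h (.node t .nil .nil)

-- pq[0]; (0,0,0) unused default for the empty heap
def pvPeek : PvHeap → Int × Int × Int
  | .nil => (0, 0, 0)
  | .node a _ _ => a

-- one iteration of A's while-loop: heappop, compute the two halves, push both
def pvStepA (h : PvHeap) : PvHeap :=
  match h with
  | .nil => .nil
  | .node t l r =>
    let diff := PySem.Int.floordiv (-t.1) 2
    let mid := t.2.1 + diff
    pvPush (pvPush (pvMerge l r) (-diff, t.2.1, mid)) (-(t.2.2 - mid), mid, t.2.2)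

def pvLoopA : Nat → PvHeap → PvHeap
  | 0, h => h
  | n + 1, h => pvLoopA n (pvStepA h)

def f (arr : List Int) (k : Int) : Int :=
  let pq : PvHeap :=
    (PySem.List.pyRange 1 (arr.length : Int) 1).foldl (fun pq i =>
      pvPush pq (-(PySem.List.pyGetD arr i 0 - PySem.List.pyGetD arr (i - 1) 0),
               min (PySem.List.pyGetD arr i 0) (PySem.List.pyGetD arr (i - 1) 0),
               max (PySem.List.pyGetD arr i 0) (PySem.List.pyGetD arr (i - 1) 0))) .nil
  -- `while k > 0` runs k times (none if k ≤ 0); `return -pq[0][0]`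
  (-(pvPeek (pvLoopA k.toNat pq)).1)

-- ===== PORT B =====

-- Python max(xs) on a list of ints, as the running-max loop; 0 unused default
def pvMaxI (l : List Int) : Int :=
  match l with
  | [] => 0
  | x :: r => r.foldl max x

-- the inner while-loop of Source B's closure computation: add the d//2**j levels
def pvLevels (s : PySem.Set Int) (q : Int) : PySem.Set Int :=
  if h : 1 ≤ q then
    pvLevels (PySem.Set.add (if 2 ≤ q then PySem.Set.add s q else s) (q + 1))
      (PySem.Int.floordiv q 2)
  else s
termination_by q.toNat
decreasing_by
  rw [PySem.Int.floordiv_eq_ediv_of_pos (by omega : (0:Int) < 2)]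
  omega

-- `max(d for d in cnt if cnt[d] > 0)` (0 unused default for the empty case)
def pvFinalMax (cnt : PySem.Dict Int Int) : Int :=
  pvMaxI ((cnt.items.filter (fun p => decide (0 < p.2))).map (·.1))

-- the main for-loop over the candidate values
def pvPass : List Int → Int → PySem.Dict Int Int → Int
  | [], _, cnt => pvFinalMax cnt
  | v :: r, k, cnt =>
    if k ≤ 0 then pvFinalMax cnt
    else
      let c := cnt.getD v 0
      if c = 0 then pvPass r k cnt
      else if k < c then v
      else
        let h := PySem.Int.floordiv v 2
        let cnt1 := cnt.insert v 0
        let cnt2 := cnt1.insert h (cnt1.getD h 0 + c)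
        let cnt3 := cnt2.insert (v - h) (cnt2.getD (v - h) 0 + c)
        pvPass r (k - c) cnt3

def f_alt (arr : List Int) (k : Int) : Int :=
  let diffs : List Int :=
    (PySem.List.pyRange 1 (arr.length : Int) 1).map (fun i =>
      PySem.List.pyGetD arr i 0 - PySem.List.pyGetD arr (i - 1) 0)
  let cnt := diffs.foldl (fun c d => c.insert d (c.getD d 0 + 1))
    (PySem.Dict.empty : PySem.Dict Int Int)
  let seen := diffs.foldl (fun s d => pvLevels s d) (PySem.Set.empty : PySem.Set Int)
  let cand := PySem.List.sorted seen (fun x => x) true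
  pvPass cand k cnt

-- ===== PRECONDITION & SPEC =====
-- A raises IndexError when len(arr) < 2 (heappop / pq[0] on an empty heap);
-- B's max() over an empty dict raises ValueError there too.
def Pre_f (arr : List Int) (k : Int) : Prop := 2 ≤ arr.length
instance (arr : List Int) (k : Int) : Decidable (Pre_f arr k) := by unfold Pre_f; infer_instance
def pvWitness_f : List Int × Int := ([0, 3, 5], 2)

-- On strictly decreasing arrays with k > 0 (every gap negative) A floor-splits a
-- negative gap, which makes the maximum gap LARGER and returns a spurious positive
-- value, while B performs no split and returns the true maximum gap; a split should
-- never increase the answer, so B's value is intended.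
def D_f (arr : List Int) (k : Int) : Prop := 0 < k ∧ ∀ p ∈ arr.zip arr.tail, p.2 < p.1
instance (arr : List Int) (k : Int) : Decidable (D_f arr k) := by unfold D_f; infer_instance

def Spec_f (arr : List Int) (k : Int) (out : Int) : Prop := ¬ D_f arr k → out = f_alt arr k
instance (arr : List Int) (k : Int) (out : Int) : Decidable (Spec_f arr k out) := by unfold Spec_f; infer_instance

def pvDiffWitness_f : List Int × Int := ([5, 2], 1)
def pvDiffWitnessOut_f : Int × Int := (5, -3)

-- ===== CLAIM (what is proved, stated in full; the proofs are below) =====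
def Claim_unchanged_f : Prop := ∀ (arr : List Int) (k : Int), Dom_f arr k → Pre_f arr k → Spec_f arr k (f arr k)
def Claim_changed_f : Prop := Dom_f (pvDiffWitness_f.1) (pvDiffWitness_f.2) ∧ Pre_f (pvDiffWitness_f.1) (pvDiffWitness_f.2) ∧ D_f (pvDiffWitness_f.1) (pvDiffWitness_f.2) ∧ f (pvDiffWitness_f.1) (pvDiffWitness_f.2) = pvDiffWitnessOut_f.1 ∧ f_alt (pvDiffWitness_f.1) (pvDiffWitness_f.2) = pvDiffWitnessOut_f.2 ∧ pvDiffWitnessOut_f.1 ≠ pvDiffWitnessOut_f.2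
def Claim_exact_f : Prop := ∀ (arr : List Int) (k : Int), Dom_f arr k → Pre_f arr k → D_f arr k → f arr k ≠ f_alt arr k

-- ===== LEMMAS AND PROOFS =====

-- short names used throughout the proofs
def pvFd (a : Int) : Int := PySem.Int.floordiv a 2
def pvVal (t : Int × Int × Int) : Int := -t.1

lemma pvFd_bounds (a : Int) : 2 * pvFd a ≤ a ∧ a ≤ 2 * pvFd a + 1 := by
  unfold pvFd
  rw [PySem.Int.floordiv_eq_ediv_of_pos (by omega : (0:Int) < 2)]
  omega

-- the diff-value process: pop one maximal value m, replace it by m//2, m - m//2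
def pvVstep (V : List Int) : List Int :=
  match V with
  | [] => []
  | _ :: _ => V.erase (pvMaxI V) ++ [pvFd (pvMaxI V), pvMaxI V - pvFd (pvMaxI V)]

def pvVloop : Nat → List Int → List Int
  | 0, V => V
  | n + 1, V => pvVloop n (pvVstep V)

-- triple shape invariant: every triple is sane (width = value) or an unsplit
-- negative original (width = -value > 0)
def pvInv (pq : List (Int × Int × Int)) : Prop :=
  ∀ t ∈ pq, t.2.2 - t.2.1 = -t.1 ∨ (0 < t.1 ∧ t.2.2 - t.2.1 = t.1)

-- ---- basic facts about pvLex ----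
lemma pvLex_iff (a b : Int × Int × Int) :
    pvLex a b = true ↔
      (a.1 < b.1 ∨ (a.1 = b.1 ∧ (a.2.1 < b.2.1 ∨ (a.2.1 = b.2.1 ∧ a.2.2 < b.2.2)))) := by
  simp [pvLex]

lemma pvLex_trans {a b c : Int × Int × Int} (h1 : pvLex a b = true)
    (h2 : pvLex b c = true) : pvLex a c = true := by
  obtain ⟨a1, a2, a3⟩ := a; obtain ⟨b1, b2, b3⟩ := b; obtain ⟨c1, c2, c3⟩ := c
  rw [pvLex_iff] at h1 h2 ⊢
  omega

lemma pvLex_trichotomy (a b : Int × Int × Int) :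
    pvLex a b = true ∨ a = b ∨ pvLex b a = true := by
  obtain ⟨a1, a2, a3⟩ := a; obtain ⟨b1, b2, b3⟩ := b
  rw [pvLex_iff, pvLex_iff]
  simp only [Prod.mk.injEq]
  omega

lemma pvLex_first_le {y m : Int × Int × Int} (h : ¬ pvLex y m = true) : m.1 ≤ y.1 := by
  obtain ⟨y1, y2, y3⟩ := y; obtain ⟨m1, m2, m3⟩ := m
  rw [pvLex_iff] at h
  simp only [not_or, not_and, not_lt] at h
  omega

lemma pvLex_asymm {a b : Int × Int × Int} (h1 : pvLex a b = true)
    (h2 : pvLex b a = true) : False := by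
  obtain ⟨a1, a2, a3⟩ := a; obtain ⟨b1, b2, b3⟩ := b
  rw [pvLex_iff] at h1 h2
  omega

lemma pvLex_irrefl (a : Int × Int × Int) : ¬ pvLex a a = true := by
  obtain ⟨a1, a2, a3⟩ := a
  rw [pvLex_iff]
  omega

lemma pvMaxI_mem {l : List Int} (h : l ≠ []) : pvMaxI l ∈ l := by
  cases l with
  | nil => exact absurd rfl h
  | cons x r =>
    show r.foldl max x ∈ x :: r
    rcases PySem.List.foldl_max_mem r x with h | h
    · simp [h]
    · simp [h]

lemma pvMaxI_ub {l : List Int} : ∀ y ∈ l, y ≤ pvMaxI l := by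
  cases l with
  | nil => intro y hy; simp at hy
  | cons x r =>
    intro y hy
    rcases List.mem_cons.mp hy with rfl | hy'
    · exact (PySem.List.le_foldl_max r y).1
    · exact (PySem.List.le_foldl_max r x).2 y hy'

lemma pvMaxI_eq_of {l : List Int} {a : Int} (hmem : a ∈ l)
    (hub : ∀ y ∈ l, y ≤ a) : pvMaxI l = a := by
  have h1 : l ≠ [] := by intro h0; rw [h0] at hmem; simp at hmem
  exact le_antisymm (hub _ (pvMaxI_mem h1)) (pvMaxI_ub _ hmem)

lemma pvMaxI_congr {l l' : List Int} (h : l.Perm l') (hne : l ≠ []) :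
    pvMaxI l = pvMaxI l' := by
  have hne' : l' ≠ [] := by
    intro hc; subst hc; exact hne h.eq_nil
  exact pvMaxI_eq_of (h.mem_iff.mpr (pvMaxI_mem hne'))
    (fun y hy => pvMaxI_ub _ (h.mem_iff.mp hy))

-- ---- unfolding / nonemptiness ----
lemma pvVstep_eq {V : List Int} (h : V ≠ []) :
    pvVstep V = V.erase (pvMaxI V) ++ [pvFd (pvMaxI V), pvMaxI V - pvFd (pvMaxI V)] := by
  cases V with
  | nil => exact absurd rfl h
  | cons x r => rfl

lemma pvVstep_ne_nil {V : List Int} (h : V ≠ []) : pvVstep V ≠ [] := by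
  rw [pvVstep_eq h]; simp

lemma pvVloop_ne_nil (n : Nat) {V : List Int} (h : V ≠ []) : pvVloop n V ≠ [] := by
  induction n generalizing V with
  | zero => exact h
  | succ n ih => exact ih (pvVstep_ne_nil h)

lemma pvVloop_add (a b : Nat) (V : List Int) :
    pvVloop (a + b) V = pvVloop b (pvVloop a V) := by
  induction a generalizing V with
  | zero => rw [Nat.zero_add]; rfl
  | succ a ih =>
    have : a + 1 + b = (a + b) + 1 := by omega
    rw [this]
    show pvVloop (a + b) (pvVstep V) = _
    rw [ih]
    rfl

-- ---- permutation lemmas ----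
lemma pvVstep_perm {V W : List Int} (h : V.Perm W) : (pvVstep V).Perm (pvVstep W) := by
  by_cases hne : V = []
  · subst hne
    have hw : W = [] := h.symm.eq_nil
    subst hw
    exact List.Perm.refl _
  · have hneW : W ≠ [] := fun hc => hne (by simpa [hc] using h)
    rw [pvVstep_eq hne, pvVstep_eq hneW, pvMaxI_congr h hne]
    exact (h.erase _).append_right _

lemma pvVloop_perm (n : Nat) {V W : List Int} (h : V.Perm W) :
    (pvVloop n V).Perm (pvVloop n W) := by
  induction n generalizing V W with
  | zero => exact h
  | succ n ih => exact ih (pvVstep_perm h)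

-- ---- heap contents and heap order ----
def pvToL : PvHeap → List (Int × Int × Int)
  | .nil => []
  | .node a l r => a :: (pvToL l ++ pvToL r)

def pvOrd : PvHeap → Prop
  | .nil => True
  | .node a l r => (∀ y ∈ pvToL l ++ pvToL r, ¬ pvLex y a = true) ∧ pvOrd l ∧ pvOrd r

lemma pvPermShuffle {α : Type} (A B C : List α) :
    ((B ++ C) ++ A).Perm ((A ++ B) ++ C) := by
  have h1 : ((B ++ C) ++ A).Perm (A ++ (B ++ C)) := List.perm_append_comm
  have h2 : A ++ (B ++ C) = (A ++ B) ++ C := (List.append_assoc A B C).symm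
  rw [h2] at h1
  exact h1

lemma pvMerge_perm (h1 h2 : PvHeap) :
    (pvToL (pvMerge h1 h2)).Perm (pvToL h1 ++ pvToL h2) := by
  generalize hn : h1.size + h2.size = n
  induction n using Nat.strong_induction_on generalizing h1 h2 with
  | _ n ih =>
    cases h1 with
    | nil => rw [pvMerge]; simp [pvToL]
    | node a l r =>
      cases h2 with
      | nil => rw [pvMerge]; simp [pvToL]
      | node b l2 r2 =>
        rw [pvMerge]
        by_cases hab : pvLex a b = true
        · rw [if_pos hab]
          have hp := ih (r.size + (PvHeap.node b l2 r2).size)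
            (by subst hn; simp [PvHeap.size] <;> omega) r (.node b l2 r2) rfl
          show (a :: (pvToL (pvMerge r (.node b l2 r2)) ++ pvToL l)).Perm
            (a :: ((pvToL l ++ pvToL r) ++ pvToL (.node b l2 r2)))
          exact List.Perm.cons a ((hp.append_right (pvToL l)).trans
            (pvPermShuffle (pvToL l) (pvToL r) (pvToL (.node b l2 r2))))
        · rw [if_neg hab]
          have hp := ih (r2.size + (PvHeap.node a l r).size)
            (by subst hn; simp [PvHeap.size] <;> omega) r2 (.node a l r) rfl
          show (b :: (pvToL (pvMerge r2 (.node a l r)) ++ pvToL l2)).Perm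
            (pvToL (.node a l r) ++ (b :: (pvToL l2 ++ pvToL r2)))
          refine List.Perm.trans ?_ List.perm_middle.symm
          refine List.Perm.cons b ?_
          exact (hp.append_right (pvToL l2)).trans
            ((pvPermShuffle (pvToL l2) (pvToL r2) (pvToL (.node a l r))).trans
              List.perm_append_comm)

lemma pvMerge_ord (h1 h2 : PvHeap) (ho1 : pvOrd h1) (ho2 : pvOrd h2) :
    pvOrd (pvMerge h1 h2) := by
  generalize hn : h1.size + h2.size = n
  induction n using Nat.strong_induction_on generalizing h1 h2 with
  | _ n ih =>
    cases h1 with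
    | nil => rw [pvMerge]; exact ho2
    | node a l r =>
      cases h2 with
      | nil => rw [pvMerge]; exact ho1
      | node b l2 r2 =>
        obtain ⟨hb1, hol, hor⟩ := ho1
        obtain ⟨hb2, hol2, hor2⟩ := ho2
        rw [pvMerge]
        by_cases hab : pvLex a b = true
        · rw [if_pos hab]
          refine ⟨?_, ?_, hol⟩
          · intro y hy
            rcases List.mem_append.mp hy with hy' | hy'
            · rcases List.mem_append.mp ((pvMerge_perm r (.node b l2 r2)).mem_iff.mp hy') with hy'' | hy''
              · exact hb1 y (List.mem_append.mpr (Or.inr hy''))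
              · rcases List.mem_cons.mp hy'' with rfl | hy3
                · exact fun hba => pvLex_asymm hab hba
                · intro hya
                  exact hb2 y hy3 (pvLex_trans hya hab)
            · exact hb1 y (List.mem_append.mpr (Or.inl hy'))
          · exact ih (r.size + (PvHeap.node b l2 r2).size)
              (by subst hn; simp [PvHeap.size] <;> omega) r (.node b l2 r2) hor
              ⟨hb2, hol2, hor2⟩ rfl
        · rw [if_neg hab]
          refine ⟨?_, ?_, hol2⟩
          · intro y hy
            rcases List.mem_append.mp hy with hy' | hy'
            · rcases List.mem_append.mp ((pvMerge_perm r2 (.node a l r)).mem_iff.mp hy') with hy'' | hy''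
              · exact hb2 y (List.mem_append.mpr (Or.inr hy''))
              · rcases List.mem_cons.mp hy'' with rfl | hy3
                · exact hab
                · intro hyb
                  have hya := hb1 y hy3
                  rcases pvLex_trichotomy a b with h | h | h
                  · exact hab h
                  · subst h; exact hya hyb
                  · exact hya (pvLex_trans hyb h)
            · exact hb2 y (List.mem_append.mpr (Or.inl hy'))
          · exact ih (r2.size + (PvHeap.node a l r).size)
              (by subst hn; simp [PvHeap.size] <;> omega) r2 (.node a l r) hor2
              ⟨hb1, hol, hor⟩ rfl

lemma pvPush_perm (h : PvHeap) (t : Int × Int × Int) :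
    (pvToL (pvPush h t)).Perm (pvToL h ++ [t]) := by
  have := pvMerge_perm h (.node t .nil .nil)
  simpa [pvToL, pvPush] using this

lemma pvPush_ord (h : PvHeap) (t : Int × Int × Int) (ho : pvOrd h) :
    pvOrd (pvPush h t) := by
  apply pvMerge_ord h _ ho
  show (∀ y ∈ pvToL PvHeap.nil ++ pvToL PvHeap.nil, ¬ pvLex y t = true) ∧ pvOrd .nil ∧ pvOrd .nil
  refine ⟨?_, trivial, trivial⟩
  intro y hy
  simp [pvToL] at hy

lemma pvRoot_lb {a : Int × Int × Int} {l r : PvHeap} (ho : pvOrd (.node a l r)) :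
    ∀ y ∈ pvToL (.node a l r), ¬ pvLex y a = true := by
  intro y hy
  rcases List.mem_cons.mp hy with rfl | hy'
  · exact pvLex_irrefl y
  · exact ho.1 y hy'

lemma pvPeek_val {h : PvHeap} (ho : pvOrd h) (hne : pvToL h ≠ []) :
    -(pvPeek h).1 = pvMaxI ((pvToL h).map pvVal) := by
  cases h with
  | nil => exact absurd rfl hne
  | node a l r =>
    symm
    apply pvMaxI_eq_of (List.mem_map_of_mem (by simp [pvToL] : a ∈ pvToL (.node a l r)))
    intro y hy
    obtain ⟨t, ht, rfl⟩ := List.mem_map.mp hy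
    have := pvLex_first_le (pvRoot_lb ho t ht)
    simp only [pvVal]
    omega

-- ---- A-side: one step of the heap process projects onto the value process ----
lemma pvStepA_toL (t : Int × Int × Int) (l r : PvHeap) :
    (pvToL (pvStepA (.node t l r))).Perm
      ((pvToL l ++ pvToL r) ++
        [(-(PySem.Int.floordiv (-t.1) 2), t.2.1, t.2.1 + PySem.Int.floordiv (-t.1) 2),
         (-(t.2.2 - (t.2.1 + PySem.Int.floordiv (-t.1) 2)),
           t.2.1 + PySem.Int.floordiv (-t.1) 2, t.2.2)]) := by
  show (pvToL (pvPush (pvPush (pvMerge l r) _) _)).Perm _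
  refine (pvPush_perm _ _).trans ?_
  refine (((pvPush_perm _ _).append_right _).trans ?_)
  refine ((((pvMerge_perm l r).append_right _).append_right _).trans ?_)
  simp

lemma pvStepA_ord {h : PvHeap} (ho : pvOrd h) : pvOrd (pvStepA h) := by
  cases h with
  | nil => trivial
  | node t l r =>
    exact pvPush_ord _ _ (pvPush_ord _ _ (pvMerge_ord l r ho.2.1 ho.2.2))

lemma pvStepA_sane {h : PvHeap} (hne : pvToL h ≠ [])
    (ho : pvOrd h) (hinv : pvInv (pvToL h))
    (hpos : 0 ≤ pvMaxI ((pvToL h).map pvVal)) :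
    ((pvToL (pvStepA h)).map pvVal).Perm (pvVstep ((pvToL h).map pvVal)) ∧
      pvInv (pvToL (pvStepA h)) ∧ pvToL (pvStepA h) ≠ [] ∧ pvOrd (pvStepA h) ∧
      0 ≤ pvMaxI ((pvToL (pvStepA h)).map pvVal) := by
  cases h with
  | nil => exact absurd rfl hne
  | node t l r =>
    have htm : t ∈ pvToL (.node t l r) := by simp [pvToL]
    have hmv : -t.1 = pvMaxI ((pvToL (.node t l r)).map pvVal) := pvPeek_val ho hne
    have hsane : t.2.2 - t.2.1 = -t.1 := by
      rcases hinv _ htm with hs | ⟨h1, h2⟩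
      · exact hs
      · exfalso; omega
    have hcons : (pvToL (.node t l r)).map pvVal
        = -t.1 :: (pvToL l ++ pvToL r).map pvVal := by
      simp [pvToL, pvVal]
    have hvst : pvVstep ((pvToL (.node t l r)).map pvVal)
        = (pvToL l ++ pvToL r).map pvVal ++ [pvFd (-t.1), -t.1 - pvFd (-t.1)] := by
      rw [pvVstep_eq (by simp [pvToL]), ← hmv, hcons, List.erase_cons_head]
    have hmapstep : ((pvToL (pvStepA (.node t l r))).map pvVal).Perm
        ((pvToL l ++ pvToL r).map pvVal ++ [pvFd (-t.1), -t.1 - pvFd (-t.1)]) := by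
      refine ((pvStepA_toL t l r).map pvVal).trans ?_
      rw [List.map_append]
      apply List.Perm.append_left
      show [pvVal _, pvVal _].Perm _
      simp only [pvVal, pvFd]
      have h1 : - -PySem.Int.floordiv (-t.1) 2 = PySem.Int.floordiv (-t.1) 2 := by omega
      have h2 : - -(t.2.2 - (t.2.1 + PySem.Int.floordiv (-t.1) 2))
          = -t.1 - PySem.Int.floordiv (-t.1) 2 := by omega
      rw [h1, h2]
    refine ⟨by rw [hvst]; exact hmapstep, ?_, ?_, pvStepA_ord ho, ?_⟩
    · intro s hs
      have hs' := (pvStepA_toL t l r).mem_iff.mp hs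
      rcases List.mem_append.mp hs' with hs'' | hs''
      · have hs3 := List.mem_append.mp hs''
        exact hinv _ (by simp [pvToL]; tauto)
      · simp only [List.mem_cons, List.not_mem_nil, or_false] at hs''
        rcases hs'' with rfl | rfl
        · left; simp
        · left; simp
    · intro hcl
      have := (pvStepA_toL t l r).symm
      rw [hcl] at this
      have h0 := this.eq_nil
      simp at h0
    · have hmem2 : -t.1 - pvFd (-t.1) ∈ (pvToL (pvStepA (.node t l r))).map pvVal := by
        rw [hmapstep.mem_iff]
        simp
      have hub := pvMaxI_ub _ hmem2
      have hb := pvFd_bounds (-t.1)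
      omega

lemma pvMA (n : Nat) : ∀ (h : PvHeap), pvToL h ≠ [] →
    pvOrd h → pvInv (pvToL h) → 0 ≤ pvMaxI ((pvToL h).map pvVal) →
    -(pvPeek (pvLoopA n h)).1 = pvMaxI (pvVloop n ((pvToL h).map pvVal)) := by
  induction n with
  | zero => intro h hne ho _ _; exact pvPeek_val ho hne
  | succ n ih =>
    intro h hne ho hinv hpos
    obtain ⟨hperm, hinv', hne', ho', hpos'⟩ := pvStepA_sane hne ho hinv hpos
    have hmapne' : (pvToL (pvStepA h)).map pvVal ≠ [] :=
      fun hc => hne' (List.map_eq_nil_iff.mp hc)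
    calc -(pvPeek (pvLoopA (n+1) h)).1
        = pvMaxI (pvVloop n ((pvToL (pvStepA h)).map pvVal)) := ih _ hne' ho' hinv' hpos'
      _ = pvMaxI (pvVloop n (pvVstep ((pvToL h).map pvVal))) :=
          pvMaxI_congr (pvVloop_perm n hperm) (pvVloop_ne_nil n hmapne')
      _ = pvMaxI (pvVloop (n+1) ((pvToL h).map pvVal)) := rfl

-- the first step when every gap value is negative
lemma pvStepA_neg {h : PvHeap} (hne : pvToL h ≠ []) (ho : pvOrd h)
    (hshape : ∀ t ∈ pvToL h, t.2.2 - t.2.1 = -t.1 ∨ t.2.2 - t.2.1 = t.1)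
    (hw : ∀ t ∈ pvToL h, 0 ≤ t.2.2 - t.2.1)
    (hinv : pvInv (pvToL h))
    (hneg : -(pvPeek h).1 < 0) :
    ((pvToL (pvStepA h)).map pvVal).Perm
      (((pvToL h).map pvVal).erase (-(pvPeek h).1) ++
        [pvFd (-(pvPeek h).1), -(-(pvPeek h).1) - pvFd (-(pvPeek h).1)]) ∧
      pvInv (pvToL (pvStepA h)) ∧ pvToL (pvStepA h) ≠ [] ∧ pvOrd (pvStepA h) ∧
      0 ≤ pvMaxI ((pvToL (pvStepA h)).map pvVal) := by
  cases h with
  | nil => exact absurd rfl hne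
  | node t l r =>
    have htm : t ∈ pvToL (.node t l r) := by simp [pvToL]
    have hpk : pvPeek (.node t l r) = t := rfl
    have hshape' : t.2.2 - t.2.1 = t.1 := by
      rcases hshape _ htm with hs | hs
      · exfalso
        have := hw _ htm
        rw [hpk] at hneg
        omega
      · exact hs
    have hcons : (pvToL (.node t l r)).map pvVal
        = -t.1 :: (pvToL l ++ pvToL r).map pvVal := by
      simp [pvToL, pvVal]
    have herase : ((pvToL (.node t l r)).map pvVal).erase (-(pvPeek (.node t l r)).1)
        = (pvToL l ++ pvToL r).map pvVal := by
      rw [hpk, hcons, List.erase_cons_head]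
    have hmapstep : ((pvToL (pvStepA (.node t l r))).map pvVal).Perm
        ((pvToL l ++ pvToL r).map pvVal ++
          [pvFd (-t.1), -(-t.1) - pvFd (-t.1)]) := by
      refine ((pvStepA_toL t l r).map pvVal).trans ?_
      rw [List.map_append]
      apply List.Perm.append_left
      show [pvVal _, pvVal _].Perm _
      simp only [pvVal, pvFd]
      have h1 : - -PySem.Int.floordiv (-t.1) 2 = PySem.Int.floordiv (-t.1) 2 := by omega
      have h2 : - -(t.2.2 - (t.2.1 + PySem.Int.floordiv (-t.1) 2))
          = -(-t.1) - PySem.Int.floordiv (-t.1) 2 := by omega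
      rw [h1, h2]
    refine ⟨by rw [herase]; exact hmapstep, ?_, ?_, pvStepA_ord ho, ?_⟩
    · intro s hs
      have hs' := (pvStepA_toL t l r).mem_iff.mp hs
      rcases List.mem_append.mp hs' with hs'' | hs''
      · have hs3 := List.mem_append.mp hs''
        exact hinv _ (by simp [pvToL]; tauto)
      · simp only [List.mem_cons, List.not_mem_nil, or_false] at hs''
        rcases hs'' with rfl | rfl
        · left; simp
        · left; simp
    · intro hcl
      have := (pvStepA_toL t l r).symm
      rw [hcl] at this
      have h0 := this.eq_nil
      simp at h0
    · have hmem2 : -(-t.1) - pvFd (-t.1) ∈ (pvToL (pvStepA (.node t l r))).map pvVal := by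
        rw [hmapstep.mem_iff]
        simp
      have hub := pvMaxI_ub _ hmem2
      have hb := pvFd_bounds (-t.1)
      rw [hpk] at hneg
      omega

-- ---- value process: batching and stationarity ----
lemma pvChild_facts {m : Int} (hm : 2 ≤ m) :
    1 ≤ pvFd m ∧ pvFd m < m ∧ 1 ≤ m - pvFd m ∧ m - pvFd m < m := by
  have := pvFd_bounds m; omega

lemma pvCount_filter_ne_self (V : List Int) (m : Int) :
    (V.filter (fun z => z ≠ m)).count m = 0 := by
  induction V with
  | nil => rfl
  | cons a V ih =>
    simp only [decide_not] at ih
    by_cases ham : a = m <;> simp [List.filter_cons, ham, List.count_cons, ih]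

lemma pvCount_filter_ne {V : List Int} {m y : Int} (hy : y ≠ m) :
    (V.filter (fun z => z ≠ m)).count y = V.count y := by
  induction V with
  | nil => rfl
  | cons a V ih =>
    simp only [decide_not] at ih
    by_cases ham : a = m
    · subst ham
      simp [List.filter_cons, List.count_cons, ih, Ne.symm hy]
    · simp [List.filter_cons, ham, List.count_cons, ih]

lemma pvVstep_max_facts {V : List Int} {m : Int} (hmax : pvMaxI V = m) (hm : 2 ≤ m)
    (hc2 : 2 ≤ V.count m) :
    pvMaxI (pvVstep V) = m ∧ (pvVstep V).count m = V.count m - 1 := by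
  have hvm : m ∈ V := List.count_pos_iff.mp (by omega)
  have hne : V ≠ [] := fun hc => by simp [hc] at hvm
  have hcf := pvChild_facts hm
  have hcnt : (V.erase m).count m = V.count m - 1 := List.count_erase_self
  constructor
  · rw [pvVstep_eq hne, hmax]
    apply pvMaxI_eq_of
    · exact List.mem_append.mpr (Or.inl (List.count_pos_iff.mp (by omega)))
    · intro y hy
      rcases List.mem_append.mp hy with h | h
      · exact hmax ▸ pvMaxI_ub _ (List.mem_of_mem_erase h)
      · simp only [List.mem_cons, List.not_mem_nil, or_false] at h
        rcases h with rfl | rfl <;> omega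
  · rw [pvVstep_eq hne, hmax, List.count_append, hcnt]
    simp only [List.count_cons, List.count_nil, beq_iff_eq]
    split_ifs <;> omega

lemma pvCntdown (i : Nat) : ∀ (V : List Int) (m : Int), pvMaxI V = m → 2 ≤ m →
    i < V.count m → pvMaxI (pvVloop i V) = m := by
  induction i with
  | zero => intro V m hmax _ _; exact hmax
  | succ i ih =>
    intro V m hmax hm hi
    show pvMaxI (pvVloop i (pvVstep V)) = m
    obtain ⟨h1, h2⟩ := pvVstep_max_facts hmax hm (by omega)
    exact ih _ _ h1 hm (by omega)

lemma pvFullBatch : ∀ (c : Nat) (V : List Int) (m : Int), 2 ≤ m → (∀ y ∈ V, y ≤ m) →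
    V.count m = c →
    (pvVloop c V).Perm (V.filter (fun y => y ≠ m) ++ List.replicate c (pvFd m)
       ++ List.replicate c (m - pvFd m)) := by
  intro c
  induction c with
  | zero =>
    intro V m hm hub hc
    have hnm : m ∉ V := by
      intro h; have := List.count_pos_iff.mpr h; omega
    have hfil : V.filter (fun y => y ≠ m) = V := by
      apply List.filter_eq_self.mpr
      intro y hy
      simp only [decide_eq_true_eq]
      rintro rfl
      exact hnm hy
    show V.Perm _
    simp only [List.replicate_zero, List.append_nil]
    rw [hfil]
  | succ c ih =>
    intro V m hm hub hc
    have hvm : m ∈ V := List.count_pos_iff.mp (by omega)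
    have hne : V ≠ [] := fun h => by simp [h] at hvm
    have hmax : pvMaxI V = m := pvMaxI_eq_of hvm hub
    have hcf := pvChild_facts hm
    have hstep : pvVstep V = V.erase m ++ [pvFd m, m - pvFd m] := by
      rw [pvVstep_eq hne, hmax]
    have hub' : ∀ y ∈ pvVstep V, y ≤ m := by
      intro y hy
      rw [hstep] at hy
      rcases List.mem_append.mp hy with h | h
      · exact hub _ (List.mem_of_mem_erase h)
      · simp only [List.mem_cons, List.not_mem_nil, or_false] at h
        rcases h with rfl | rfl <;> omega
    have hcnt' : (pvVstep V).count m = c := by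
      rw [hstep, List.count_append, List.count_erase_self]
      simp only [List.count_cons, List.count_nil, beq_iff_eq]
      split_ifs <;> omega
    have ih' := ih (pvVstep V) m hm hub' hcnt'
    show (pvVloop c (pvVstep V)).Perm _
    apply ih'.trans
    rw [List.perm_iff_count]
    intro y
    rw [hstep, List.filter_append]
    have hf1 : pvFd m ≠ m := by omega
    have hf2 : m - pvFd m ≠ m := by omega
    have hfl : ([pvFd m, m - pvFd m].filter (fun z => z ≠ m)) = [pvFd m, m - pvFd m] := by
      simp [List.filter_cons, hf1, hf2]
    rw [hfl]
    by_cases hy : y = m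
    · subst hy
      simp only [List.count_append, pvCount_filter_ne_self, List.count_replicate,
        List.count_cons, List.count_nil, beq_iff_eq]
      split_ifs <;> omega
    · have hce : (V.erase m).count y = V.count y := List.count_erase_of_ne hy
      simp only [List.count_append, pvCount_filter_ne hy, List.count_replicate,
        List.count_cons, List.count_nil, beq_iff_eq, hce]
      split_ifs <;> omega

lemma pvStationary (n : Nat) : ∀ (V : List Int), V ≠ [] → 0 ≤ pvMaxI V → pvMaxI V ≤ 1 →
    pvMaxI (pvVloop n V) = pvMaxI V := by
  induction n with
  | zero => intro V _ _ _; rfl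
  | succ n ih =>
    intro V hne h0 h1
    have hfd : pvFd (pvMaxI V) = 0 := by
      have := pvFd_bounds (pvMaxI V); omega
    have hstep : pvVstep V = V.erase (pvMaxI V) ++ [0, pvMaxI V] := by
      rw [pvVstep_eq hne, hfd]
      simp
    have hmax' : pvMaxI (pvVstep V) = pvMaxI V := by
      rw [hstep]
      apply pvMaxI_eq_of (by simp)
      intro y hy
      rcases List.mem_append.mp hy with h | h
      · exact pvMaxI_ub _ (List.mem_of_mem_erase h)
      · simp only [List.mem_cons, List.not_mem_nil, or_false] at h
        rcases h with rfl | rfl <;> omega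
    show pvMaxI (pvVloop n (pvVstep V)) = _
    rw [ih _ (pvVstep_ne_nil hne) (by omega) (by omega), hmax']

-- once the maximum is ≥ 1 it stays ≥ 1 forever (child m - m//2 ≥ 1)
lemma pvVloop_max_ge_one (n : Nat) : ∀ (V : List Int), V ≠ [] → 1 ≤ pvMaxI V →
    1 ≤ pvMaxI (pvVloop n V) := by
  induction n with
  | zero => intro V _ h; exact h
  | succ n ih =>
    intro V hne h1
    have hb := pvFd_bounds (pvMaxI V)
    have hmem : pvMaxI V - pvFd (pvMaxI V) ∈ pvVstep V := by
      rw [pvVstep_eq hne]; simp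
    have hub := pvMaxI_ub _ hmem
    exact ih (pvVstep V) (pvVstep_ne_nil hne) (by omega)

-- ---- counters as dictionaries ----
def pvRel (V : List Int) (cnt : PySem.Dict Int Int) : Prop :=
  ∀ v : Int, (V.count v : Int) = cnt.getD v 0

lemma pvMemFiltered {cnt : PySem.Dict Int Int} (hnd : cnt.keys.Nodup) (x : Int) :
    x ∈ ((cnt.items.filter (fun p => decide (0 < p.2))).map (·.1)) ↔ 0 < cnt.getD x 0 := by
  constructor
  · intro hx
    obtain ⟨p, hp, rfl⟩ := List.mem_map.mp hx
    obtain ⟨a, b⟩ := p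
    have hp' := List.mem_filter.mp hp
    have hg : cnt.getD a 0 = b := PySem.Dict.getD_of_mem_items cnt hp'.1 hnd 0
    have hb : 0 < b := by simpa using hp'.2
    simpa [hg] using hb
  · intro hx
    rcases hq : cnt.get? x with _ | c
    · rw [PySem.Dict.getD_eq_get?_getD, hq] at hx
      simp at hx
    · have hmem := PySem.Dict.mem_items_of_get?_eq_some cnt hq
      have hg : cnt.getD x 0 = c := by rw [PySem.Dict.getD_eq_get?_getD, hq]; rfl
      refine List.mem_map.mpr ⟨(x, c), List.mem_filter.mpr ⟨hmem, ?_⟩, rfl⟩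
      simp [← hg, hx]

lemma pvFinalMax_eq {V : List Int} {cnt : PySem.Dict Int Int} (hnd : cnt.keys.Nodup)
    (hrel : pvRel V cnt) (hne : V ≠ []) : pvFinalMax cnt = pvMaxI V := by
  unfold pvFinalMax
  apply pvMaxI_eq_of
  · rw [pvMemFiltered hnd, ← hrel]
    exact_mod_cast List.count_pos_iff.mpr (pvMaxI_mem hne)
  · intro y hy
    rw [pvMemFiltered hnd, ← hrel] at hy
    exact pvMaxI_ub _ (List.count_pos_iff.mp (by exact_mod_cast hy))

lemma pvPass_nonpos {cand : List Int} {k : Int} {cnt : PySem.Dict Int Int} (hk : k ≤ 0) :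
    pvPass cand k cnt = pvFinalMax cnt := by
  cases cand with
  | nil => rfl
  | cons v r => simp [pvPass, hk]

-- ---- the halving-closure candidate set ----
-- the values recorded by the inner while-loop for a starting value q
def pvLS (q x : Int) : Prop :=
  ∃ j : Nat, (x = PySem.Int.floordiv q (2 ^ j) ∧ 2 ≤ x) ∨
    (x = PySem.Int.floordiv q (2 ^ j) + 1 ∧ 1 ≤ PySem.Int.floordiv q (2 ^ j))

lemma pvFd_pow (q : Int) (j : Nat) :
    PySem.Int.floordiv (PySem.Int.floordiv q 2) (2 ^ j) = PySem.Int.floordiv q (2 ^ (j + 1)) := by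
  have h2 : (0:Int) < 2 := by omega
  have hp : (0:Int) < 2 ^ j := by positivity
  have hp' : (0:Int) < 2 ^ (j + 1) := by positivity
  rw [PySem.Int.floordiv_eq_ediv_of_pos h2, PySem.Int.floordiv_eq_ediv_of_pos hp,
    PySem.Int.floordiv_eq_ediv_of_pos hp']
  rw [Int.ediv_ediv_eq_ediv_mul] <;> norm_num [pow_succ, mul_comm]

lemma pvFd_nonpos {q : Int} (hq : q ≤ 0) (j : Nat) :
    PySem.Int.floordiv q (2 ^ j) ≤ 0 := by
  have hp : (0:Int) < 2 ^ j := by positivity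
  rw [PySem.Int.floordiv_eq_ediv_of_pos hp]
  calc q / 2 ^ j ≤ 0 / 2 ^ j := Int.ediv_le_ediv hp hq
    _ = 0 := by simp

lemma pvLS_iff {q : Int} (hq : 1 ≤ q) (x : Int) :
    pvLS q x ↔ ((2 ≤ q ∧ x = q) ∨ x = q + 1 ∨ pvLS (PySem.Int.floordiv q 2) x) := by
  constructor
  · rintro ⟨j, h⟩
    cases j with
    | zero =>
      simp only [pow_zero] at h
      rcases h with ⟨rfl, h2⟩ | ⟨rfl, h1⟩
      · left
        have : PySem.Int.floordiv q 1 = q := by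
          rw [PySem.Int.floordiv_eq_ediv_of_pos (by omega : (0:Int) < 1)]; simp
        omega
      · right; left
        have : PySem.Int.floordiv q 1 = q := by
          rw [PySem.Int.floordiv_eq_ediv_of_pos (by omega : (0:Int) < 1)]; simp
        omega
    | succ j =>
      right; right
      exact ⟨j, by rw [pvFd_pow]; exact h⟩
  · rintro (⟨h2, rfl⟩ | rfl | ⟨j, h⟩)
    · refine ⟨0, Or.inl ⟨?_, h2⟩⟩
      rw [pow_zero, PySem.Int.floordiv_eq_ediv_of_pos (by omega : (0:Int) < 1)]; simp
    · refine ⟨0, Or.inr ⟨?_, ?_⟩⟩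
      · rw [pow_zero, PySem.Int.floordiv_eq_ediv_of_pos (by omega : (0:Int) < 1)]; simp
      · rw [pow_zero, PySem.Int.floordiv_eq_ediv_of_pos (by omega : (0:Int) < 1)]; simpa using hq
    · exact ⟨j + 1, by rw [← pvFd_pow]; exact h⟩

lemma pvLS_not_of_nonpos {q : Int} (hq : ¬ 1 ≤ q) (x : Int) : ¬ pvLS q x := by
  rintro ⟨j, h⟩
  have := pvFd_nonpos (by omega : q ≤ 0) j
  rcases h with ⟨rfl, h2⟩ | ⟨_, h1⟩ <;> omega

lemma mem_pvLevels (q : Int) : ∀ (s : PySem.Set Int) (x : Int),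
    x ∈ pvLevels s q ↔ x ∈ s ∨ pvLS q x := by
  by_cases hq0 : 0 ≤ q
  · generalize hn : q.toNat = n
    induction n using Nat.strong_induction_on generalizing q with
    | _ n ih =>
      intro s x
      by_cases hq : 1 ≤ q
      · rw [pvLevels, dif_pos hq]
        have hfd2 : (0:Int) < 2 := by omega
        have hlt : (PySem.Int.floordiv q 2).toNat < n := by
          rw [PySem.Int.floordiv_eq_ediv_of_pos hfd2]
          omega
        have hfd0 : 0 ≤ PySem.Int.floordiv q 2 := by
          rw [PySem.Int.floordiv_eq_ediv_of_pos hfd2]; omega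
        rw [ih _ hlt _ hfd0 rfl]
        rw [PySem.Set.mem_add]
        by_cases h2 : 2 ≤ q
        · rw [if_pos h2, PySem.Set.mem_add, pvLS_iff hq]
          tauto
        · rw [if_neg h2, pvLS_iff hq]
          constructor
          · rintro ((h | h) | h)
            · exact Or.inl h
            · subst h; tauto
            · tauto
          · rintro (h | (h | h | h))
            · exact Or.inl (Or.inl h)
            · omega
            · subst h; tauto
            · tauto
      · rw [pvLevels, dif_neg hq]
        simp [pvLS_not_of_nonpos hq]
  · intro s x
    have hq : ¬ 1 ≤ q := by omega
    rw [pvLevels, dif_neg hq]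
    simp [pvLS_not_of_nonpos hq]

lemma mem_pvSeen (diffs2 : List Int) (x : Int) :
    x ∈ diffs2.foldl (fun s d => pvLevels s d) (PySem.Set.empty : PySem.Set Int) ↔
      ∃ d ∈ diffs2, pvLS d x := by
  have gen : ∀ (l : List Int) (s : PySem.Set Int),
      x ∈ l.foldl (fun s d => pvLevels s d) s ↔ x ∈ s ∨ ∃ d ∈ l, pvLS d x := by
    intro l
    induction l with
    | nil => intro s; simp
    | cons d l ih =>
      intro s
      rw [List.foldl_cons, ih, mem_pvLevels]
      simp only [List.mem_cons]
      constructor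
      · rintro ((h | h) | ⟨e, he, hx⟩)
        · exact Or.inl h
        · exact Or.inr ⟨d, Or.inl rfl, h⟩
        · exact Or.inr ⟨e, Or.inr he, hx⟩
      · rintro (h | ⟨e, (rfl | he), hx⟩)
        · exact Or.inl (Or.inl h)
        · exact Or.inl (Or.inr hx)
        · exact Or.inr ⟨e, he, hx⟩
  rw [gen diffs2 _]
  simp [PySem.Set.empty]

lemma pvLS_ge_two {q x : Int} (h : pvLS q x) : 2 ≤ x := by
  obtain ⟨j, h⟩ := h
  rcases h with ⟨rfl, h2⟩ | ⟨rfl, h1⟩ <;> omega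

lemma pvLS_self {x : Int} (h2 : 2 ≤ x) : pvLS x x := by
  refine ⟨0, Or.inl ⟨?_, h2⟩⟩
  rw [pow_zero, PySem.Int.floordiv_eq_ediv_of_pos (by omega : (0:Int) < 1)]; simp

lemma pvLS_child {q w u : Int} (h : pvLS q w)
    (hu : u = pvFd w ∨ u = w - pvFd w) (h2 : 2 ≤ u) : pvLS q u := by
  obtain ⟨j, hw⟩ := h
  have hcomp : PySem.Int.floordiv q (2 ^ (j + 1)) =
      PySem.Int.floordiv (PySem.Int.floordiv q (2 ^ j)) 2 := by
    have hp : (0:Int) < 2 ^ j := by positivity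
    have hp' : (0:Int) < 2 ^ (j + 1) := by positivity
    rw [PySem.Int.floordiv_eq_ediv_of_pos hp, PySem.Int.floordiv_eq_ediv_of_pos hp',
      PySem.Int.floordiv_eq_ediv_of_pos (by omega : (0:Int) < 2)]
    rw [Int.ediv_ediv_eq_ediv_mul] <;> norm_num [pow_succ]
  have hb : 2 * PySem.Int.floordiv (PySem.Int.floordiv q (2 ^ j)) 2 ≤
      PySem.Int.floordiv q (2 ^ j) ∧
      PySem.Int.floordiv q (2 ^ j) ≤
        2 * PySem.Int.floordiv (PySem.Int.floordiv q (2 ^ j)) 2 + 1 :=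
    pvFd_bounds _
  have hbu : 2 * pvFd w ≤ w ∧ w ≤ 2 * pvFd w + 1 := pvFd_bounds w
  have hw' : w = PySem.Int.floordiv q (2 ^ j) ∨ w = PySem.Int.floordiv q (2 ^ j) + 1 := by
    rcases hw with ⟨h, _⟩ | ⟨h, _⟩
    · exact Or.inl h
    · exact Or.inr h
  have hcases : u = PySem.Int.floordiv (PySem.Int.floordiv q (2 ^ j)) 2 ∨
      u = PySem.Int.floordiv (PySem.Int.floordiv q (2 ^ j)) 2 + 1 := by
    rcases hw' with hww | hww <;> rcases hu with rfl | rfl <;> omega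
  refine ⟨j + 1, ?_⟩
  rw [hcomp]
  rcases hcases with hc | hc
  · exact Or.inl ⟨hc, h2⟩
  · exact Or.inr ⟨hc, by omega⟩

-- ---- the candidate pass computes the value process ----
def pvCnt3 (cnt : PySem.Dict Int Int) (v : Int) : PySem.Dict Int Int :=
  let c := cnt.getD v 0
  let h := pvFd v
  let cnt1 := cnt.insert v 0
  let cnt2 := cnt1.insert h (cnt1.getD h 0 + c)
  cnt2.insert (v - h) (cnt2.getD (v - h) 0 + c)

lemma pvPass_cons {v : Int} {r : List Int} {k : Int} {cnt : PySem.Dict Int Int}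
    (hk : ¬ k ≤ 0) :
    pvPass (v :: r) k cnt =
      (if cnt.getD v 0 = 0 then pvPass r k cnt
       else if k < cnt.getD v 0 then v
       else pvPass r (k - cnt.getD v 0) (pvCnt3 cnt v)) := by
  simp [pvPass, hk, pvCnt3, pvFd]

lemma pvCnt3_nodup {cnt : PySem.Dict Int Int} (hnd : cnt.keys.Nodup) (v : Int) :
    (pvCnt3 cnt v).keys.Nodup := by
  unfold pvCnt3
  exact PySem.Dict.nodup_keys_insert _ _ _
    (PySem.Dict.nodup_keys_insert _ _ _ (PySem.Dict.nodup_keys_insert _ _ _ hnd))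

lemma pvCnt3_rel {cnt : PySem.Dict Int Int} {V : List Int} {v : Int}
    (hrel : pvRel V cnt) (hv2 : 2 ≤ v) :
    pvRel (V.filter (fun y => y ≠ v) ++ List.replicate (V.count v) (pvFd v)
      ++ List.replicate (V.count v) (v - pvFd v)) (pvCnt3 cnt v) := by
  intro x
  have hx0 := hrel x
  have hv0 := hrel v
  have hf0 := hrel (pvFd v)
  have hs0 := hrel (v - pvFd v)
  have hcf := pvChild_facts hv2
  have hcount : ((V.filter (fun y => y ≠ v) ++ List.replicate (V.count v) (pvFd v)
      ++ List.replicate (V.count v) (v - pvFd v)).count x : Int)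
      = (if x = v then 0 else (V.count x : Int))
        + (if x = pvFd v then (V.count v : Int) else 0)
        + (if x = v - pvFd v then (V.count v : Int) else 0) := by
    rw [List.count_append, List.count_append, List.count_replicate, List.count_replicate]
    by_cases hxv : x = v
    · subst hxv
      rw [pvCount_filter_ne_self]
      push_cast
      simp only [beq_iff_eq]
      split_ifs <;> omega
    · rw [pvCount_filter_ne hxv]
      push_cast
      simp only [beq_iff_eq]
      split_ifs <;> omega
  rw [hcount]
  unfold pvCnt3
  simp only [PySem.Dict.getD_insert]
  split_ifs <;> subst_vars <;> omega

lemma pvMB : ∀ (cand : List Int) (k : Int) (cnt : PySem.Dict Int Int) (V : List Int),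
    cnt.keys.Nodup → pvRel V cnt →
    cand.Pairwise (fun a b => b < a) →
    (∀ w ∈ cand, 2 ≤ w) →
    (∀ w ∈ cand, ∀ u, (u = pvFd w ∨ u = w - pvFd w) → 2 ≤ u → u ∈ cand) →
    (∀ v ∈ V, 2 ≤ v → v ∈ cand) →
    (∃ v ∈ V, 0 ≤ v) →
    V ≠ [] →
    pvPass cand k cnt = pvMaxI (pvVloop k.toNat V) := by
  intro cand
  induction cand with
  | nil =>
    intro k cnt V hnd hrel hsort hge2 hclosed hbig hpos hne
    show pvFinalMax cnt = _
    by_cases hk : k ≤ 0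
    · have h0 : k.toNat = 0 := by omega
      rw [h0]
      exact pvFinalMax_eq hnd hrel hne
    · have hub : pvMaxI V ≤ 1 := by
        by_contra hgt
        have := hbig _ (pvMaxI_mem hne) (by omega)
        simp at this
      obtain ⟨v0, hv0, hv0p⟩ := hpos
      have hlb : 0 ≤ pvMaxI V := le_trans hv0p (pvMaxI_ub _ hv0)
      rw [pvStationary _ _ hne hlb hub]
      exact pvFinalMax_eq hnd hrel hne
  | cons v r ih =>
    intro k cnt V hnd hrel hsort hge2 hclosed hbig hpos hne
    have hv2 : 2 ≤ v := hge2 v (by simp)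
    have hcfv := pvChild_facts hv2
    have hrlt : ∀ w ∈ r, w < v := by
      intro w hw
      exact (List.pairwise_cons.mp hsort).1 w hw
    have hsort' := (List.pairwise_cons.mp hsort).2
    have hge2' : ∀ w ∈ r, 2 ≤ w := fun w hw => hge2 w (by simp [hw])
    have hclosed' : ∀ w ∈ r, ∀ u, (u = pvFd w ∨ u = w - pvFd w) → 2 ≤ u → u ∈ r := by
      intro w hw u hu h2
      have hu' := hclosed w (by simp [hw]) u hu h2
      have hwlt := hrlt w hw
      have hcf := pvChild_facts (hge2' w hw)
      have hultv : u < v := by rcases hu with rfl | rfl <;> omega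
      rcases List.mem_cons.mp hu' with rfl | h
      · omega
      · exact h
    by_cases hk : k ≤ 0
    · rw [pvPass_nonpos hk]
      have h0 : k.toNat = 0 := by omega
      rw [h0]
      exact pvFinalMax_eq hnd hrel hne
    · rw [pvPass_cons hk]
      have hcV : (V.count v : Int) = cnt.getD v 0 := hrel v
      by_cases hc0 : cnt.getD v 0 = 0
      · rw [if_pos hc0]
        apply ih k cnt V hnd hrel hsort' hge2' hclosed' ?_ hpos hne
        intro x hx h2
        rcases List.mem_cons.mp (hbig x hx h2) with rfl | h
        · exfalso
          have : 0 < V.count x := List.count_pos_iff.mpr hx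
          omega
        · exact h
      · rw [if_neg hc0]
        have hc1 : 1 ≤ cnt.getD v 0 := by
          have : (0:Int) ≤ (V.count v : Int) := by positivity
          omega
        have hvV : v ∈ V := List.count_pos_iff.mp (by omega)
        have hmax : pvMaxI V = v := by
          apply pvMaxI_eq_of hvV
          intro y hy
          by_cases h2 : 2 ≤ y
          · rcases List.mem_cons.mp (hbig y hy h2) with rfl | h
            · exact le_refl _
            · exact le_of_lt (hrlt y h)
          · omega
        by_cases hkc : k < cnt.getD v 0
        · rw [if_pos hkc]
          exact (pvCntdown k.toNat V v hmax hv2 (by omega)).symm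
        · rw [if_neg hkc]
          have hfull := pvFullBatch (V.count v) V v hv2
            (fun y hy => hmax ▸ pvMaxI_ub y hy) rfl
          have hsvV : v - pvFd v ∈ List.replicate (V.count v) (v - pvFd v) :=
            List.mem_replicate.mpr ⟨by omega, rfl⟩
          have hsW : v - pvFd v ∈ V.filter (fun y => y ≠ v) ++ List.replicate (V.count v) (pvFd v)
              ++ List.replicate (V.count v) (v - pvFd v) := by
            rw [List.mem_append]
            exact Or.inr hsvV
          have hWne : V.filter (fun y => y ≠ v) ++ List.replicate (V.count v) (pvFd v)
              ++ List.replicate (V.count v) (v - pvFd v) ≠ [] := by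
            intro hcl
            rw [hcl] at hsW
            simp at hsW
          have hbigW : ∀ x ∈ V.filter (fun y => y ≠ v) ++ List.replicate (V.count v) (pvFd v)
              ++ List.replicate (V.count v) (v - pvFd v), 2 ≤ x → x ∈ r := by
            intro x hx h2
            rcases List.mem_append.mp hx with hx' | hx'
            · rcases List.mem_append.mp hx' with hx'' | hx''
              · have hxV := List.mem_of_mem_filter hx''
                have hxne : x ≠ v := by
                  have := List.of_mem_filter hx''
                  simpa using this
                rcases List.mem_cons.mp (hbig x hxV h2) with rfl | h
                · exact absurd rfl hxne
                · exact h
              · have hxe : x = pvFd v := (List.mem_replicate.mp hx'').2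
                subst hxe
                rcases List.mem_cons.mp (hclosed v (by simp) _ (Or.inl rfl) h2) with he | he
                · omega
                · exact he
            · have hxe : x = v - pvFd v := (List.mem_replicate.mp hx').2
              subst hxe
              rcases List.mem_cons.mp (hclosed v (by simp) _ (Or.inr rfl) h2) with he | he
              · omega
              · exact he
          have htail := ih (k - cnt.getD v 0) (pvCnt3 cnt v) _
            (pvCnt3_nodup hnd v) (pvCnt3_rel hrel hv2) hsort' hge2' hclosed' hbigW
            ⟨v - pvFd v, hsW, by omega⟩ hWne
          rw [htail]
          have hksplit : k.toNat = (V.count v) + (k - cnt.getD v 0).toNat := by omega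
          rw [hksplit, pvVloop_add]
          exact (pvMaxI_congr (pvVloop_perm _ hfull)
            (pvVloop_ne_nil _ (pvVloop_ne_nil _ hne))).symm

-- ---- assembling B's pass over the computed candidates ----
lemma pvLevels_nodup (q : Int) : ∀ s : PySem.Set Int, s.Nodup → (pvLevels s q).Nodup := by
  by_cases hq0 : 0 ≤ q
  · generalize hn : q.toNat = n
    induction n using Nat.strong_induction_on generalizing q with
    | _ n ih =>
      intro s hs
      by_cases hq : 1 ≤ q
      · rw [pvLevels, dif_pos hq]
        have hfd2 : (0:Int) < 2 := by omega
        have hlt : (PySem.Int.floordiv q 2).toNat < n := by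
          rw [PySem.Int.floordiv_eq_ediv_of_pos hfd2]
          omega
        have hfd0 : 0 ≤ PySem.Int.floordiv q 2 := by
          rw [PySem.Int.floordiv_eq_ediv_of_pos hfd2]; omega
        apply ih _ hlt _ hfd0 rfl
        apply PySem.Set.nodup_add
        by_cases h2 : 2 ≤ q
        · rw [if_pos h2]
          apply PySem.Set.nodup_add
          exact hs
        · rw [if_neg h2]; exact hs
      · rw [pvLevels, dif_neg hq]; exact hs
  · intro s hs
    rw [pvLevels, dif_neg (by omega : ¬ 1 ≤ q)]
    exact hs

lemma pvSeen_nodup (diffs2 : List Int) :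
    (diffs2.foldl (fun s d => pvLevels s d) (PySem.Set.empty : PySem.Set Int)).Nodup := by
  have gen : ∀ (l : List Int) (s : PySem.Set Int), s.Nodup →
      (l.foldl (fun s d => pvLevels s d) s).Nodup := by
    intro l
    induction l with
    | nil => intro s hs; exact hs
    | cons d l ihl => intro s hs; exact ihl _ (pvLevels_nodup d s hs)
  exact gen diffs2 _ (by simp [PySem.Set.empty])

lemma pvCnt_nodup (diffs2 : List Int) :
    ((diffs2.foldl (fun c d => c.insert d (c.getD d 0 + 1))
      (PySem.Dict.empty : PySem.Dict Int Int)).keys).Nodup :=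
  PySem.Dict.nodup_keys_foldl_insert diffs2 _ _ PySem.Dict.nodup_keys_empty

lemma pvCnt_rel (diffs2 : List Int) :
    pvRel diffs2 (diffs2.foldl (fun c d => c.insert d (c.getD d 0 + 1))
      (PySem.Dict.empty : PySem.Dict Int Int)) := by
  intro v
  rw [PySem.Dict.getD_foldl_insert_add_one]
  simp

lemma pvMB_apply (diffs2 : List Int) (k2 : Int)
    (hne : diffs2 ≠ []) (hpos : ∃ v ∈ diffs2, 0 ≤ v) :
    pvPass (PySem.List.sorted
        (diffs2.foldl (fun s d => pvLevels s d) (PySem.Set.empty : PySem.Set Int))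
        (fun x => x) true) k2
      (diffs2.foldl (fun c d => c.insert d (c.getD d 0 + 1))
        (PySem.Dict.empty : PySem.Dict Int Int))
    = pvMaxI (pvVloop k2.toNat diffs2) := by
  have hmemcand : ∀ x : Int,
      x ∈ PySem.List.sorted
        (diffs2.foldl (fun s d => pvLevels s d) (PySem.Set.empty : PySem.Set Int))
        (fun x => x) true ↔ ∃ d ∈ diffs2, pvLS d x := by
    intro x
    rw [PySem.List.mem_sorted, mem_pvSeen]
  apply pvMB
  · exact pvCnt_nodup diffs2
  · exact pvCnt_rel diffs2
  · -- strictly decreasing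
    have hpair := PySem.List.sorted_pairwise_rev
      (xs := diffs2.foldl (fun s d => pvLevels s d) (PySem.Set.empty : PySem.Set Int))
      (key := fun x => x)
    have hnodup : (PySem.List.sorted
        (diffs2.foldl (fun s d => pvLevels s d) (PySem.Set.empty : PySem.Set Int))
        (fun x => x) true).Nodup :=
      (PySem.List.sorted_perm _ _ _).nodup_iff.mpr (pvSeen_nodup diffs2)
    have := List.Pairwise.and hpair hnodup
    exact this.imp (fun h => by
      obtain ⟨h1, h2⟩ := h
      omega)
  · intro w hw
    obtain ⟨d, _, hls⟩ := (hmemcand w).mp hw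
    exact pvLS_ge_two hls
  · intro w hw u hu h2
    obtain ⟨d, hd, hls⟩ := (hmemcand w).mp hw
    exact (hmemcand u).mpr ⟨d, hd, pvLS_child hls hu h2⟩
  · intro v hv h2
    exact (hmemcand v).mpr ⟨v, hv, pvLS_self h2⟩
  · exact hpos
  · exact hne

lemma pvTrip_shape (X Y : Int) :
    (max X Y - min X Y = (X - Y) ∨ max X Y - min X Y = -(X - Y)) ∧
      0 ≤ max X Y - min X Y := by
  rcases le_total X Y with h | h
  · rw [max_eq_right h, min_eq_left h]; omega
  · rw [max_eq_left h, min_eq_right h]; omega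

-- when every gap is negative the inner while-loops never run and the
-- candidate set stays empty
lemma pvSeen_neg {diffs2 : List Int} (hneg : ∀ d ∈ diffs2, d < 0) :
    diffs2.foldl (fun s d => pvLevels s d) (PySem.Set.empty : PySem.Set Int)
      = PySem.Set.empty := by
  induction diffs2 with
  | nil => rfl
  | cons d l ih =>
    have hd : ¬ 1 ≤ d := by have := hneg d (by simp); omega
    rw [List.foldl_cons, pvLevels, dif_neg hd]
    exact ih (fun x hx => hneg x (by simp [hx]))

-- the gap list of f / f_alt, index-by-index
lemma pvDiff_at (arr : List Int) (j : Nat) (hj : j + 1 < arr.length) :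
    PySem.List.pyGetD arr (1 + (j:Int)) 0 - PySem.List.pyGetD arr (1 + (j:Int) - 1) 0
      = arr[j + 1] - arr[j] := by
  have h1 : (1 + (j:Int)) = ((j + 1 : Nat) : Int) := by push_cast; ring
  have h2 : (1 + (j:Int) - 1) = ((j : Nat) : Int) := by push_cast; ring
  rw [h2, h1, PySem.List.pyGetD_natCast, PySem.List.pyGetD_natCast,
    List.getD_eq_getElem arr 0 hj, List.getD_eq_getElem arr 0 (by omega)]

-- strictly decreasing, index by index (the body of D_f)
lemma pvZip_iff (arr : List Int) :
    (∀ p ∈ arr.zip arr.tail, p.2 < p.1) ↔ ∀ j (_ : j + 1 < arr.length), arr[j + 1] < arr[j] := by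
  constructor
  · intro h j hj
    have hjz : j < (arr.zip arr.tail).length := by
      simp only [List.length_zip, List.length_tail]
      omega
    have := h _ (List.getElem_mem hjz)
    rw [List.getElem_zip] at this
    simpa [List.getElem_tail] using this
  · intro h p hp
    obtain ⟨j, hj, rfl⟩ := List.mem_iff_getElem.mp hp
    have hjl : j + 1 < arr.length := by
      simp only [List.length_zip, List.length_tail] at hj
      omega
    rw [List.getElem_zip]
    simpa [List.getElem_tail] using h j hjl

-- every gap negative ⟺ strictly decreasing
lemma pvDiffs_neg_iff (arr : List Int) :
    (∀ d ∈ (PySem.List.pyRange 1 (arr.length : Int) 1).map (fun i =>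
        PySem.List.pyGetD arr i 0 - PySem.List.pyGetD arr (i - 1) 0), d < 0) ↔
      ∀ j (_ : j + 1 < arr.length), arr[j + 1] < arr[j] := by
  constructor
  · intro h j hj
    have hx : (1 + (j:Int)) ∈ PySem.List.pyRange 1 (arr.length : Int) 1 :=
      PySem.List.mem_pyRange_one.mpr ⟨by omega, by push_cast; omega⟩
    have hmem := List.mem_map_of_mem (f := fun i =>
      PySem.List.pyGetD arr i 0 - PySem.List.pyGetD arr (i - 1) 0) hx
    have hlt := h _ hmem
    simp only at hlt
    rw [pvDiff_at arr j hj] at hlt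
    omega
  · intro h d hd
    obtain ⟨x, hx, rfl⟩ := List.mem_map.mp hd
    obtain ⟨hx1, hx2⟩ := PySem.List.mem_pyRange_one.mp hx
    show PySem.List.pyGetD arr x 0 - PySem.List.pyGetD arr (x - 1) 0 < 0
    have hxe : x = 1 + (((x - 1).toNat : Nat) : Int) := by omega
    have hjl : (x - 1).toNat + 1 < arr.length := by omega
    rw [hxe, pvDiff_at arr _ hjl]
    have := h _ hjl
    omega

-- shared setup: the heap built by A corresponds to the diff list
lemma pvSetup (arr : List Int) (hlen : 2 ≤ arr.length) :
    ∃ pq0 : PvHeap,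
      (∀ k : Int, f arr k = -(pvPeek (pvLoopA k.toNat pq0)).1) ∧
      pvOrd pq0 ∧ pvToL pq0 ≠ [] ∧ pvInv (pvToL pq0) ∧
      (∀ t ∈ pvToL pq0, (t.2.2 - t.2.1 = -t.1 ∨ t.2.2 - t.2.1 = t.1) ∧ 0 ≤ t.2.2 - t.2.1) ∧
      ((pvToL pq0).map pvVal).Perm
        ((PySem.List.pyRange 1 (arr.length : Int) 1).map (fun i =>
          PySem.List.pyGetD arr i 0 - PySem.List.pyGetD arr (i - 1) 0)) := by
  set rng := PySem.List.pyRange 1 (arr.length : Int) 1 with hrng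
  set trip : Int → Int × Int × Int := fun i =>
    (-(PySem.List.pyGetD arr i 0 - PySem.List.pyGetD arr (i - 1) 0),
      min (PySem.List.pyGetD arr i 0) (PySem.List.pyGetD arr (i - 1) 0),
      max (PySem.List.pyGetD arr i 0) (PySem.List.pyGetD arr (i - 1) 0)) with htrip
  set dfun : Int → Int := fun i =>
    PySem.List.pyGetD arr i 0 - PySem.List.pyGetD arr (i - 1) 0 with hdfun
  refine ⟨rng.foldl (fun h i => pvPush h (trip i)) .nil, fun k => rfl, ?_, ?_, ?_, ?_, ?_⟩
  case _ =>
    -- order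
    have hbord : ∀ (l : List Int) (h0 : PvHeap), pvOrd h0 →
        pvOrd (l.foldl (fun h i => pvPush h (trip i)) h0) := by
      intro l
      induction l with
      | nil => intro h0 ho; exact ho
      | cons i l ihl => intro h0 ho; exact ihl _ (pvPush_ord _ _ ho)
    exact hbord rng .nil trivial
  all_goals {
    have hbuild : ∀ (l : List Int) (h0 : PvHeap),
        (pvToL (l.foldl (fun h i => pvPush h (trip i)) h0)).Perm (pvToL h0 ++ l.map trip) := by
      intro l
      induction l with
      | nil => intro h0; simp
      | cons i l ihl =>
        intro h0
        simp only [List.foldl_cons, List.map_cons]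
        refine (ihl _).trans ?_
        refine ((pvPush_perm h0 (trip i)).append_right (l.map trip)).trans ?_
        rw [List.append_assoc]
        exact List.Perm.refl _
    have hperm0 : (pvToL (rng.foldl (fun h i => pvPush h (trip i)) .nil)).Perm (rng.map trip) := by
      have := hbuild rng .nil
      simpa [pvToL] using this
    have hshape : ∀ t ∈ pvToL (rng.foldl (fun h i => pvPush h (trip i)) .nil),
        (t.2.2 - t.2.1 = -t.1 ∨ t.2.2 - t.2.1 = t.1) ∧ 0 ≤ t.2.2 - t.2.1 := by
      intro t ht
      obtain ⟨i, _, rfl⟩ := List.mem_map.mp (hperm0.mem_iff.mp ht)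
      have := pvTrip_shape (PySem.List.pyGetD arr i 0) (PySem.List.pyGetD arr (i - 1) 0)
      simp only [htrip]
      constructor
      · omega
      · omega
    first
    | -- nonempty
      (intro hc
       have hlen0 := hperm0.length_eq
       rw [hc] at hlen0
       have hrnglen : rng.length = ((arr.length : Int) - 1).toNat := by
         rw [hrng, PySem.List.length_pyRange_one]
       simp [hrnglen] at hlen0
       omega)
    | -- invariant
      (intro t ht
       obtain ⟨h1, h2⟩ := hshape t ht
       rcases h1 with h | h
       · left; exact h
       · omega)
    | -- shape
      exact hshape
    | -- value permutation
      (have heq : (rng.map trip).map pvVal = rng.map dfun := by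
         rw [List.map_map, hdfun]
         apply List.map_congr_left
         intro i _
         simp [pvVal, htrip]
       calc ((pvToL (rng.foldl (fun h i => pvPush h (trip i)) .nil)).map pvVal).Perm
              ((rng.map trip).map pvVal) := hperm0.map pvVal
         _ = rng.map dfun := heq)
  }

-- A = B outside D_f
lemma pvMain (arr : List Int) (k : Int) (hlen : 2 ≤ arr.length)
    (hnd : ¬ D_f arr k) : f arr k = f_alt arr k := by
  obtain ⟨pq0, hf, hord0, hpqne, hinv, hshape, hvalperm⟩ := pvSetup arr hlen
  set diffs : List Int := (PySem.List.pyRange 1 (arr.length : Int) 1).map (fun i =>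
    PySem.List.pyGetD arr i 0 - PySem.List.pyGetD arr (i - 1) 0) with hdiffs
  have hmapne : (pvToL pq0).map pvVal ≠ [] := fun hc => hpqne (List.map_eq_nil_iff.mp hc)
  have hdne : diffs ≠ [] := by
    intro hc
    rw [hc] at hvalperm
    exact hmapne hvalperm.eq_nil
  have hmaxeq : pvMaxI ((pvToL pq0).map pvVal) = pvMaxI diffs := pvMaxI_congr hvalperm hmapne
  have halt : f_alt arr k = pvPass
      (PySem.List.sorted (diffs.foldl (fun s d => pvLevels s d) (PySem.Set.empty : PySem.Set Int))
        (fun x => x) true) k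
      (diffs.foldl (fun c d => c.insert d (c.getD d 0 + 1))
        (PySem.Dict.empty : PySem.Dict Int Int)) := rfl
  by_cases hm : 0 ≤ pvMaxI diffs
  · have hA : f arr k = pvMaxI (pvVloop k.toNat diffs) := by
      rw [hf, pvMA k.toNat _ hpqne hord0 hinv (by rw [hmaxeq]; exact hm)]
      exact pvMaxI_congr (pvVloop_perm _ hvalperm) (pvVloop_ne_nil _ hmapne)
    rw [hA, halt]
    exact (pvMB_apply diffs k hdne ⟨pvMaxI diffs, pvMaxI_mem hdne, hm⟩).symm
  · -- every gap is negative; ¬ D_f forces k ≤ 0, so neither program splits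
    push_neg at hm
    have hneg : ∀ d ∈ diffs, d < 0 := fun d hd => lt_of_le_of_lt (pvMaxI_ub _ hd) hm
    have hchain : ∀ p ∈ arr.zip arr.tail, p.2 < p.1 :=
      (pvZip_iff arr).mpr ((pvDiffs_neg_iff arr).mp hneg)
    have hk : k ≤ 0 := by
      by_contra hk'
      exact hnd ⟨by omega, hchain⟩
    have h0 : k.toNat = 0 := by omega
    have hA : f arr k = pvMaxI diffs := by
      rw [hf, h0]
      show -(pvPeek pq0).1 = _
      rw [pvPeek_val hord0 hpqne, hmaxeq]
    rw [hA, halt, pvPass_nonpos hk]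
    exact (pvFinalMax_eq (pvCnt_nodup diffs) (pvCnt_rel diffs) hdne).symm

-- inside D_f: A returns a positive value, B the (negative) true maximum gap
lemma pvNeq (arr : List Int) (k : Int) (hlen : 2 ≤ arr.length)
    (hd : D_f arr k) : f arr k ≠ f_alt arr k := by
  obtain ⟨hk, hchain⟩ := hd
  obtain ⟨pq0, hf, hord0, hpqne, hinv, hshape, hvalperm⟩ := pvSetup arr hlen
  set diffs : List Int := (PySem.List.pyRange 1 (arr.length : Int) 1).map (fun i =>
    PySem.List.pyGetD arr i 0 - PySem.List.pyGetD arr (i - 1) 0) with hdiffs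
  have hneg : ∀ d ∈ diffs, d < 0 := (pvDiffs_neg_iff arr).mpr ((pvZip_iff arr).mp hchain)
  have hmapne : (pvToL pq0).map pvVal ≠ [] := fun hc => hpqne (List.map_eq_nil_iff.mp hc)
  have hdne : diffs ≠ [] := by
    intro hc
    rw [hc] at hvalperm
    exact hmapne hvalperm.eq_nil
  have hmaxeq : pvMaxI ((pvToL pq0).map pvVal) = pvMaxI diffs := pvMaxI_congr hvalperm hmapne
  have hm : pvMaxI diffs < 0 := hneg _ (pvMaxI_mem hdne)
  -- B: empty candidate list, no split, result = max gap < 0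
  have hBalt : f_alt arr k = pvMaxI diffs := by
    have halt : f_alt arr k = pvPass
        (PySem.List.sorted (diffs.foldl (fun s d => pvLevels s d) (PySem.Set.empty : PySem.Set Int))
          (fun x => x) true) k
        (diffs.foldl (fun c d => c.insert d (c.getD d 0 + 1))
          (PySem.Dict.empty : PySem.Dict Int Int)) := rfl
    rw [halt, pvSeen_neg hneg]
    show pvPass [] k _ = _
    exact pvFinalMax_eq (pvCnt_nodup diffs) (pvCnt_rel diffs) hdne
  -- A: the first split produces the gap -m - m//2 ≥ 2, so the result is ≥ 1
  have hneg' : -(pvPeek pq0).1 < 0 := by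
    rw [pvPeek_val hord0 hpqne, hmaxeq]
    exact hm
  obtain ⟨hperm, hinv', hne', hord', hpos'⟩ := pvStepA_neg hpqne hord0
    (fun t ht => (hshape t ht).1) (fun t ht => (hshape t ht).2) hinv hneg'
  have hmapne' : (pvToL (pvStepA pq0)).map pvVal ≠ [] :=
    fun hc => hne' (List.map_eq_nil_iff.mp hc)
  have hstep1 : pvLoopA k.toNat pq0 = pvLoopA (k - 1).toNat (pvStepA pq0) := by
    have hts : k.toNat = (k - 1).toNat + 1 := by omega
    rw [hts]
    rfl
  have hA : f arr k = pvMaxI (pvVloop (k - 1).toNat ((pvToL (pvStepA pq0)).map pvVal)) := by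
    rw [hf, hstep1]
    exact pvMA _ _ hne' hord' hinv' hpos'
  have hbnd := pvFd_bounds (-(pvPeek pq0).1)
  have hmem1 : -(-(pvPeek pq0).1) - pvFd (-(pvPeek pq0).1)
      ∈ (pvToL (pvStepA pq0)).map pvVal := by
    rw [hperm.mem_iff]
    simp
  have hub1 := pvMaxI_ub _ hmem1
  have hge1 : 1 ≤ f arr k := by
    rw [hA]
    exact pvVloop_max_ge_one _ _ (fun hc => hmapne' hc) (by omega)
  rw [hBalt]
  omega

-- ===== VERDICT (by name: the statement is the Claim_ definition above) =====
theorem f_spec : Claim_unchanged_f := by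
  intro arr k _hdom hpre hnd
  exact pvMain arr k hpre hnd

theorem f_changed : Claim_changed_f := by
  unfold Claim_changed_f
  refine ⟨by decide, by decide, by decide, ?_, ?_, by decide⟩
  · show f [5, 2] 1 = 5
    have hr : PySem.List.pyRange 1 (2 : Int) 1 = [1] := by decide
    have hg1 : PySem.List.pyGetD ([5, 2] : List Int) 1 0 = 2 := by decide
    have hg0 : PySem.List.pyGetD ([5, 2] : List Int) 0 0 = 5 := by decide
    simp [f, hr, hg1, hg0, pvLoopA, pvStepA, pvPush, pvMerge, pvPeek, pvLex, PySem.Int.floordiv]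
  · show f_alt [5, 2] 1 = -3
    have hr : PySem.List.pyRange 1 (2 : Int) 1 = [1] := by decide
    have hg1 : PySem.List.pyGetD ([5, 2] : List Int) 1 0 = 2 := by decide
    have hg0 : PySem.List.pyGetD ([5, 2] : List Int) 0 0 = 5 := by decide
    have hlev : pvLevels ([] : PySem.Set Int) (-3) = ([] : PySem.Set Int) := by
      rw [pvLevels]; norm_num
    simp [f_alt, hr, hg1, hg0, hlev, pvPass, pvFinalMax, pvMaxI,
      PySem.Dict.empty, PySem.Set.empty, PySem.List.sorted, PySem.Dict.insert, PySem.Dict.getD,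
      PySem.Dict.get?, PySem.Dict.contains]

theorem f_tight : Claim_exact_f := by
  intro arr k _hdom hpre hd
  exact pvNeq arr k hpre hd
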